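-- pv_equiv track=rewrite | github.com/Theo911/AEA_Sorting_Networks | sorting_network_rl/utils/prune.py | prune_redundant_comparators
-- ===== SOURCE A (Python) =====
-- import itertools
-- from typing import List, Tuple
--
-- def apply_comparators(inputs: List[int], comparators: List[Tuple[int, int]]) -> List[int]:
--     out = inputs.copy()
--     for i, j in comparators:
--         if out[i] > out[j]:
--             out[i], out[j] = out[j], out[i]
--     return out
--
-- def is_sorted(sequence: List[int]) -> bool:
--     return all(x <= y for x, y in zip(sequence, sequence[1:]))
--
-- def prune_redundant_comparators(n: int, comparators: List[Tuple[int, int]]) -> List[Tuple[int, int]]: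
--     """
--     Prune redundant comparators from a sorting network.
--     Args:
--         n (int): Number of wires (channels).
--         comparators (List[Tuple[int, int]]): List of comparator pairs (i, j).
--     """
--     inputs = list(itertools.product([0, 1], repeat=n))
--     pruned = []
--
--     for idx, (i, j) in enumerate(comparators):
--         essential = False
--         for x in inputs:
--             before = apply_comparators(list(x), pruned)
--             with_current = before.copy()
--             if with_current[i] > with_current[j]:
--                 with_current[i], with_current[j] = with_current[j], with_current[i]
--             if is_sorted(with_current) and not is_sorted(before):
--                 essential = True
--                 break
--         if essential:
--             pruned.append((i, j))
--
--     return pruned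
-- ===== SOURCE B (Python) =====
-- def _sorted(seq):
--     return all(x <= y for x, y in zip(seq, seq[1:]))
--
-- def prune_redundant_comparators(n, comparators):
--     # Maintain the 2**n binary vectors already passed through the kept
--     # comparators, updating them in place when a comparator is kept,
--     # instead of re-applying the whole kept prefix for every test.
--     states = [[(v >> (n - 1 - k)) & 1 for k in range(n)] for v in range(1 << n)]
--     pruned = []
--     for i, j in comparators:
--         essential = False
--         for st in states:
--             if st[i] > st[j]:
--                 wc = st.copy()
--                 wc[i], wc[j] = wc[j], wc[i]
--                 if _sorted(wc) and not _sorted(st):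
--                     essential = True
--                     break
--         if essential:
--             pruned.append((i, j))
--             for st in states:
--                 if st[i] > st[j]:
--                     st[i], st[j] = st[j], st[i]
--     return pruned
-- ===== Notes on version B (the rewrite author's own statement) =====
-- stated objective: alternative
-- what changed: B keeps the 2^n binary test vectors as states updated in place each time a comparator is kept (generating them by bit arithmetic over range(2**n)) and only examines states the comparator actually fires on, instead of re-applying the whole kept prefix to every vector for every candidate comparator; a timing run could not certify a speed-up (both sides are exponential in n), so none is claimed.
import Mathlib
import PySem

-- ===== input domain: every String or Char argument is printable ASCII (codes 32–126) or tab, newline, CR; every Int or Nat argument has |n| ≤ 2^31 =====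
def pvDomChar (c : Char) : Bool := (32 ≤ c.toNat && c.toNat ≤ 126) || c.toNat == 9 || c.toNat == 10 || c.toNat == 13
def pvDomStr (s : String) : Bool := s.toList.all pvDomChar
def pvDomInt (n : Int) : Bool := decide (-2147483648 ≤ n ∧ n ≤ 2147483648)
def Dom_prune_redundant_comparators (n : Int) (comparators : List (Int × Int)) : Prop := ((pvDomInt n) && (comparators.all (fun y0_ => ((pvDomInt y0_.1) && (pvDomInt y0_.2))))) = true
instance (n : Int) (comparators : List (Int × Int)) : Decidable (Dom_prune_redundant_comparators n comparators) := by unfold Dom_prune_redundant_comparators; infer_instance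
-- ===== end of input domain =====

-- B replaces A's re-application of the kept prefix to every test vector by 2^n
-- incrementally maintained states, updated in place when a comparator is kept
-- (objective: alternative algorithm, same cost).

-- ===== PORT A =====
-- the conditional compare-exchange inside apply_comparators (and the inline one in the main loop)
def pvStepA (out : List Int) (ij : Int × Int) : List Int :=
  match PySem.List.pyGet? out ij.1, PySem.List.pyGet? out ij.2 with
  | some a, some b =>
      if a > b then PySem.List.pySetD (PySem.List.pySetD out ij.1 b) ij.2 a else out
  | _, _ => out  -- IndexError in Python; unreachable under Pre_

def pvApplyComparators (inputs : List Int) (comparators : List (Int × Int)) : List Int :=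
  comparators.foldl pvStepA inputs

def pvIsSorted (s : List Int) : Bool :=
  (s.zip (PySem.List.slice s (some 1) none)).all (fun p => p.1 ≤ p.2)

-- itertools.product([0, 1], repeat=n), each tuple as a list
def pvProd01 : Nat → List (List Int)
  | 0 => [[]]
  | k + 1 => (pvProd01 k).map (fun t => 0 :: t) ++ (pvProd01 k).map (fun t => 1 :: t)

-- A's inner 'for x in inputs: … break' loop
def pvFindEssential (xs : List (List Int)) (pruned : List (Int × Int)) (ij : Int × Int) : Bool :=
  match xs with
  | [] => false
  | x :: rest =>
      let before := pvApplyComparators x pruned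
      let with_current := pvStepA before ij
      if pvIsSorted with_current && !pvIsSorted before then true
      else pvFindEssential rest pruned ij

def prune_redundant_comparators (n : Int) (comparators : List (Int × Int)) : List (Int × Int) :=
  let inputs := pvProd01 n.toNat
  comparators.foldl
    (fun pruned ij => if pvFindEssential inputs pruned ij then pruned ++ [ij] else pruned) []

-- ===== PORT B =====
def pvStepB (st : List Int) (ij : Int × Int) : List Int :=
  match PySem.List.pyGet? st ij.1, PySem.List.pyGet? st ij.2 with
  | some a, some b =>
      if a > b then PySem.List.pySetD (PySem.List.pySetD st ij.1 b) ij.2 a else st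
  | _, _ => st  -- IndexError in Python; unreachable under Pre_

def pvSortedB (s : List Int) : Bool :=
  (s.zip (PySem.List.slice s (some 1) none)).all (fun p => p.1 ≤ p.2)

-- [(v >> (n - 1 - k)) & 1 for k in range(n)]
def pvBitsB (n : Nat) (v : Nat) : List Int :=
  (List.range n).map (fun k => (((v >>> (n - 1 - k)) % 2 : Nat) : Int))

def pvUseful (ij : Int × Int) (st : List Int) : Bool :=
  match PySem.List.pyGet? st ij.1, PySem.List.pyGet? st ij.2 with
  | some a, some b =>
      if a > b then
        let wc := PySem.List.pySetD (PySem.List.pySetD st ij.1 b) ij.2 a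
        pvSortedB wc && !pvSortedB st
      else false
  | _, _ => false

def prune_redundant_comparators_alt (n : Int) (comparators : List (Int × Int)) : List (Int × Int) :=
  let states0 := (List.range (2 ^ n.toNat)).map (pvBitsB n.toNat)
  (comparators.foldl
    (fun (acc : List (Int × Int) × List (List Int)) ij =>
      if acc.2.any (pvUseful ij) then (acc.1 ++ [ij], acc.2.map (fun st => pvStepB st ij))
      else acc)
    (([] : List (Int × Int)), states0)).1

-- ===== PRECONDITION & SPEC =====
-- Pre_ excludes exactly the inputs on which Python A raises: negative n
-- (ValueError from itertools.product) and comparator indices outside [-n, n)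
-- (IndexError when indexing a length-n vector).
def Pre_prune_redundant_comparators (n : Int) (comparators : List (Int × Int)) : Prop :=
  0 ≤ n ∧ ∀ p ∈ comparators, -n ≤ p.1 ∧ p.1 < n ∧ -n ≤ p.2 ∧ p.2 < n
instance (n : Int) (comparators : List (Int × Int)) : Decidable (Pre_prune_redundant_comparators n comparators) := by unfold Pre_prune_redundant_comparators; infer_instance

def pvWitness_prune_redundant_comparators : Int × (List (Int × Int)) := (2, [(0, 1), (0, 1)])

def Spec_prune_redundant_comparators (n : Int) (comparators : List (Int × Int)) (out : List (Int × Int)) : Prop := out = prune_redundant_comparators_alt n comparators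
instance (n : Int) (comparators : List (Int × Int)) (out : List (Int × Int)) : Decidable (Spec_prune_redundant_comparators n comparators out) := by unfold Spec_prune_redundant_comparators; infer_instance

-- ===== CLAIM (what is proved, stated in full; the proofs are below) =====
def Claim_equal_prune_redundant_comparators : Prop := ∀ (n : Int) (comparators : List (Int × Int)), Dom_prune_redundant_comparators n comparators → Pre_prune_redundant_comparators n comparators → Spec_prune_redundant_comparators n comparators (prune_redundant_comparators n comparators)

-- ===== LEMMAS AND PROOFS =====

theorem pvStep_eq : pvStepA = pvStepB := rfl
theorem pvSorted_eq : pvIsSorted = pvSortedB := rfl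

theorem pvApply_nil (x : List Int) : pvApplyComparators x [] = x := rfl

theorem pvApply_append (x : List Int) (p : List (Int × Int)) (ij : Int × Int) :
    pvApplyComparators x (p ++ [ij]) = pvStepB (pvApplyComparators x p) ij := by
  simp [pvApplyComparators, List.foldl_append, pvStep_eq]

theorem pvUseful_eq (ij : Int × Int) (st : List Int) :
    pvUseful ij st = (pvSortedB (pvStepB st ij) && !pvSortedB st) := by
  unfold pvUseful pvStepB
  cases PySem.List.pyGet? st ij.1 <;> cases PySem.List.pyGet? st ij.2 <;>
    simp [Bool.and_not_self]
  split <;> simp_all [Bool.and_not_self]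

theorem pvFind_eq_any (xs : List (List Int)) (p : List (Int × Int)) (ij : Int × Int) :
    pvFindEssential xs p ij
      = (xs.map (fun x => pvApplyComparators x p)).any (pvUseful ij) := by
  induction xs with
  | nil => rfl
  | cons x rest ih =>
      simp only [pvFindEssential, List.map_cons, List.any_cons, ← ih, pvUseful_eq,
        pvStep_eq, pvSorted_eq]
      split <;> simp_all

-- bit j (j < k) of 2^k + w agrees with bit j of w
theorem pvBit_add_pow (k j w : Nat) (hj : j < k) :
    ((2 ^ k + w) >>> j) % 2 = (w >>> j) % 2 := by
  have h1 : 2 ^ k = 2 ^ (k - j) * 2 ^ j := by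
    rw [← pow_add]; congr 1; omega
  have h2 : (2 ^ k + w) >>> j = 2 ^ (k - j) + w >>> j := by
    rw [Nat.shiftRight_eq_div_pow, Nat.shiftRight_eq_div_pow, h1, Nat.add_comm,
      Nat.add_mul_div_right _ _ (Nat.two_pow_pos j), Nat.add_comm]
  have h3 : 2 ^ (k - j) = 2 * 2 ^ (k - j - 1) := by
    rw [← pow_succ']; congr 1; omega
  rw [h2, h3]
  omega

theorem pvBitsB_add_pow (k w : Nat) : pvBitsB k (2 ^ k + w) = pvBitsB k w := by
  unfold pvBitsB
  refine List.map_congr_left ?_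
  intro x hx
  rw [List.mem_range] at hx
  rw [pvBit_add_pow k (k - 1 - x) w (by omega)]

theorem pvBitsB_succ (k v : Nat) :
    pvBitsB (k + 1) v = (((v >>> k) % 2 : Nat) : Int) :: pvBitsB k v := by
  unfold pvBitsB
  rw [List.range_succ_eq_map]
  simp only [List.map_cons, List.map_map]
  congr 1
  refine List.map_congr_left ?_
  intro x _
  simp only [Function.comp_apply]
  congr 3
  omega

theorem pvBits_prod : ∀ n : Nat, (List.range (2 ^ n)).map (pvBitsB n) = pvProd01 n := by
  intro n
  induction n with
  | zero => rfl
  | succ k ih =>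
      have hsplit : (2 : Nat) ^ (k + 1) = 2 ^ k + 2 ^ k := by ring
      rw [hsplit, List.range_add, List.map_append]
      unfold pvProd01
      congr 1
      · refine Eq.trans ?_ (by rw [← ih, List.map_map])
        refine List.map_congr_left ?_
        intro v hv
        rw [List.mem_range] at hv
        simp only [Function.comp, pvBitsB_succ]
        have h0 : v >>> k = 0 := by
          rw [Nat.shiftRight_eq_div_pow]; exact Nat.div_eq_of_lt hv
        simp [h0]
      · rw [List.map_map]
        refine Eq.trans ?_ (by rw [← ih, List.map_map])
        refine List.map_congr_left ?_
        intro v hv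
        rw [List.mem_range] at hv
        simp only [Function.comp, pvBitsB_succ, pvBitsB_add_pow]
        have h1 : (2 ^ k + v) >>> k = 1 := by
          rw [Nat.shiftRight_eq_div_pow, Nat.add_comm,
            Nat.add_div_right _ (Nat.two_pow_pos k), Nat.div_eq_of_lt hv]
        simp [h1]

theorem pvLoop (cs : List (Int × Int)) (inputs : List (List Int)) :
    ∀ pruned : List (Int × Int),
    (cs.foldl
      (fun (acc : List (Int × Int) × List (List Int)) ij =>
        if acc.2.any (pvUseful ij) then (acc.1 ++ [ij], acc.2.map (fun st => pvStepB st ij))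
        else acc)
      (pruned, inputs.map (fun x => pvApplyComparators x pruned))).1
    = cs.foldl
        (fun pruned ij => if pvFindEssential inputs pruned ij then pruned ++ [ij] else pruned)
        pruned := by
  induction cs with
  | nil => intro pruned; rfl
  | cons ij rest ih =>
      intro pruned
      rw [List.foldl_cons, List.foldl_cons, pvFind_eq_any]
      cases h : (inputs.map (fun x => pvApplyComparators x pruned)).any (pvUseful ij) with
      | true =>
          simp only [if_true]
          have hst : (inputs.map (fun x => pvApplyComparators x pruned)).map
              (fun st => pvStepB st ij)
              = inputs.map (fun x => pvApplyComparators x (pruned ++ [ij])) := by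
            rw [List.map_map]
            refine List.map_congr_left ?_
            intro x _
            simp [Function.comp, pvApply_append]
          rw [hst]
          exact ih (pruned ++ [ij])
      | false =>
          simp only [Bool.false_eq_true, if_false]
          exact ih pruned

-- ===== VERDICT (by name: the statement is the Claim_ definition above) =====
theorem prune_redundant_comparators_spec : Claim_equal_prune_redundant_comparators := by
  intro n comparators _ _
  unfold Spec_prune_redundant_comparators
  have h := pvLoop comparators (pvProd01 n.toNat) []
  simp only [pvApply_nil, List.map_id'] at h
  simp only [prune_redundant_comparators, prune_redundant_comparators_alt, pvBits_prod]
  exact h.symm
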